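-- pv_equiv track=rewrite | github.com/smokeytheblair/adventcode | 2020/day6.py | make_groups
-- ===== SOURCE A (Python) =====
-- def make_groups(questions):
--     answers = []
--     group = ""
--     for question in questions:
--         if question != "":
--             group += question
--         else:
--             answers.append(group)
--             group = ""
--
--     answers.append(group)
--
--     return answers
-- ===== SOURCE B (Python) =====
-- def make_groups(questions):
--     breaks = [i for i, q in enumerate(questions) if q == ""]
--     answers = []
--     start = 0
--     for b in breaks:
--         answers.append("".join(questions[start:b]))
--         start = b + 1
--     answers.append("".join(questions[start:]))
--     return answers
-- ===== Notes on version B (the rewrite author's own statement) =====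
-- stated objective: alternative
-- what changed: Replaces the single stateful accumulate-or-flush loop by a two-phase decomposition: first collect the indices of all blank lines, then emit each group as ''.join of the slice between consecutive blanks (plus the trailing slice).
import Mathlib
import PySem

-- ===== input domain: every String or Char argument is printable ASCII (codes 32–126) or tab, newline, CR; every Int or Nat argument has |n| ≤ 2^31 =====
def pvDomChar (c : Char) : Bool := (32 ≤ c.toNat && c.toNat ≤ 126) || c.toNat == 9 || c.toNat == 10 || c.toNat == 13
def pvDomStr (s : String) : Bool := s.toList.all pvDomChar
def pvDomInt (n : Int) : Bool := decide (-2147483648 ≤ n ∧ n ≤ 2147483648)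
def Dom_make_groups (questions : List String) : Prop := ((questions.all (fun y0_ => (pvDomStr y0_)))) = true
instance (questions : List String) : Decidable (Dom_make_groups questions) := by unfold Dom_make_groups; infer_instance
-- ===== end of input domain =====

-- B replaces A's single accumulate-or-flush loop by a two-phase decomposition (collect blank-line
-- indices, then join the slices between them); same cost, no speed claim.

-- ===== PORT A =====
def make_groups (questions : List String) : List String :=
  let st := questions.foldl
    (fun (st : List String × String) question =>
      if question ≠ "" then (st.1, st.2 ++ question)
      else (st.1 ++ [st.2], ""))
    ([], "")
  st.1 ++ [st.2]

-- ===== PORT B =====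
def make_groups_alt (questions : List String) : List String :=
  let breaks : List Int :=
    ((PySem.List.enumerate questions).filter (fun p => p.2 == "")).map (fun p => p.1)
  let st := breaks.foldl
    (fun (st : List String × Int) b =>
      (st.1 ++ [PySem.Str.join "" (PySem.List.slice questions (some st.2) (some b))], b + 1))
    ([], 0)
  st.1 ++ [PySem.Str.join "" (PySem.List.slice questions (some st.2) none)]

-- ===== PRECONDITION & SPEC =====
def Spec_make_groups (questions : List String) (out : List String) : Prop := out = make_groups_alt questions
instance (questions : List String) (out : List String) : Decidable (Spec_make_groups questions out) := by unfold Spec_make_groups; infer_instance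

-- ===== CLAIM (what is proved, stated in full; the proofs are below) =====
def Claim_equal_make_groups : Prop := ∀ (questions : List String), Dom_make_groups questions → Spec_make_groups questions (make_groups questions)

-- ===== LEMMAS AND PROOFS =====

-- reference grouping both ports are proved equal to
def chunks : List String → List String
  | [] => [""]
  | q :: qs =>
    if q = "" then "" :: chunks qs
    else match chunks qs with
         | [] => []
         | h :: t => (q ++ h) :: t

theorem chunks_ne_nil (qs : List String) : chunks qs ≠ [] := by
  induction qs with
  | nil => simp [chunks]
  | cons q qs ih =>
    simp only [chunks]
    split_ifs
    · simp
    · rcases h : chunks qs with _ | ⟨h1, t⟩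
      · exact absurd h ih
      · simp

-- "" .join on strings, structurally
theorem join_empty_nil : PySem.Str.join "" [] = "" := by
  simp [PySem.Str.join, PySem.Chars.join_nil]

theorem join_empty_cons (x : String) (xs : List String) :
    PySem.Str.join "" (x :: xs) = x ++ PySem.Str.join "" xs := by
  cases xs with
  | nil => simp [PySem.Str.join, PySem.Chars.join_singleton, PySem.Chars.join_nil]
  | cons y ys => simp [PySem.Str.join, PySem.Chars.join_cons_cons]

-- ===== A side =====
theorem aLoop (qs : List String) : ∀ (ans : List String) (g : String),
    (List.foldl
      (fun (st : List String × String) question =>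
        if question ≠ "" then (st.1, st.2 ++ question)
        else (st.1 ++ [st.2], "")) (ans, g) qs).1
    ++ [(List.foldl
      (fun (st : List String × String) question =>
        if question ≠ "" then (st.1, st.2 ++ question)
        else (st.1 ++ [st.2], "")) (ans, g) qs).2]
    = ans ++ (match chunks qs with | [] => [] | h :: t => (g ++ h) :: t) := by
  induction qs with
  | nil => intro ans g; simp [chunks]
  | cons q qs ih =>
    intro ans g
    by_cases hq : q = ""
    · subst hq
      simp only [List.foldl_cons, ne_eq, not_true_eq_false, if_false]
      rw [ih (ans ++ [g]) ""]
      rcases h : chunks qs with _ | ⟨h1, t⟩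
      · exact absurd h (chunks_ne_nil qs)
      · simp [chunks, h, List.append_assoc]
    · simp only [List.foldl_cons, if_pos (show q ≠ "" from hq)]
      rw [ih ans (g ++ q)]
      simp only [chunks, if_neg hq]
      rcases h : chunks qs with _ | ⟨h1, t⟩
      · simp
      · simp [String.append_assoc]

theorem A_eq_chunks (qs : List String) : make_groups qs = chunks qs := by
  have h0 := aLoop qs [] ""
  rcases h : chunks qs with _ | ⟨h1, t⟩
  · exact absurd h (chunks_ne_nil qs)
  · simpa [make_groups, h] using h0

-- ===== B side (loop lemmas) =====
-- positions of the blank lines, as naturals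
def natBreaks : List String → List Nat
  | [] => []
  | q :: qs => (if q = "" then [0] else []) ++ (natBreaks qs).map (· + 1)

theorem enum_filter (qs : List String) : ∀ (s : Int),
    ((PySem.List.enumerate qs s).filter (fun p => p.2 == "")).map (fun p => p.1)
    = (natBreaks qs).map (fun k : Nat => s + (k : Int)) := by
  induction qs with
  | nil => intro s; simp [PySem.List.enumerate_nil, natBreaks]
  | cons q qs ih =>
    intro s
    rw [PySem.List.enumerate_cons]
    have step : ((natBreaks qs).map (· + 1)).map (fun k : Nat => s + (k : Int))
        = (natBreaks qs).map (fun k : Nat => s + 1 + (k : Int)) := by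
      rw [List.map_map]
      exact List.map_congr_left (fun k _ => by simp; ring)
    by_cases hq : q = ""
    · subst hq
      rw [List.filter_cons_of_pos (by simp), List.map_cons, ih (s + 1),
        show natBreaks ("" :: qs) = 0 :: (natBreaks qs).map (· + 1) from by
          simp [natBreaks],
        List.map_cons, step]
      norm_num
    · rw [List.filter_cons_of_neg (by simp [hq]), ih (s + 1),
        show natBreaks (q :: qs) = (natBreaks qs).map (· + 1) from by
          simp [natBreaks, hq],
        step]

-- B's loop over the (natural) break positions, recursion replacing the foldl
def bloopN (qs : List String) : List String → Nat → List Nat → List String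
  | ans, s, [] => ans ++ [PySem.Str.join "" (qs.drop s)]
  | ans, s, b :: bs =>
    bloopN qs (ans ++ [PySem.Str.join "" ((qs.drop s).take (b - s))]) (b + 1) bs

theorem bridge (qs : List String) : ∀ (bs : List Nat) (ans : List String) (s : Nat),
    (List.foldl
      (fun (st : List String × Int) b =>
        (st.1 ++ [PySem.Str.join "" (PySem.List.slice qs (some st.2) (some b))], b + 1))
      (ans, (s : Int)) (bs.map (fun k : Nat => (k : Int)))).1
    ++ [PySem.Str.join "" (PySem.List.slice qs
        (some (List.foldl
          (fun (st : List String × Int) b =>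
            (st.1 ++ [PySem.Str.join "" (PySem.List.slice qs (some st.2) (some b))], b + 1))
          (ans, (s : Int)) (bs.map (fun k : Nat => (k : Int)))).2) none)]
    = bloopN qs ans s bs := by
  intro bs
  induction bs with
  | nil => intro ans s; simp [bloopN, PySem.List.slice_from_natCast]
  | cons b bs ih =>
    intro ans s
    simp only [List.map_cons, List.foldl_cons]
    rw [PySem.List.slice_natCast]
    have hcast : (b : Int) + 1 = ((b + 1 : Nat) : Int) := by push_cast; ring
    rw [hcast, ih]
    rfl

theorem bloopN_acc (qs : List String) : ∀ (bs : List Nat) (a1 a2 : List String) (s : Nat),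
    bloopN qs (a1 ++ a2) s bs = a1 ++ bloopN qs a2 s bs := by
  intro bs
  induction bs with
  | nil => intro a1 a2 s; simp [bloopN]
  | cons b bs ih =>
    intro a1 a2 s
    simp only [bloopN, List.append_assoc]
    exact ih a1 _ _

theorem bloopN_single (qs : List String) (bs : List Nat) (a : String) (s : Nat) :
    bloopN qs [a] s bs = a :: bloopN qs [] s bs := by
  simpa using bloopN_acc qs bs [a] [] s

theorem bloopN_shift (q : String) (qs : List String) : ∀ (bs : List Nat) (ans : List String) (s : Nat),
    bloopN (q :: qs) ans (s + 1) (bs.map (· + 1)) = bloopN qs ans s bs := by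
  intro bs
  induction bs with
  | nil => intro ans s; simp [bloopN, List.drop_succ_cons]
  | cons b bs ih =>
    intro ans s
    simp only [List.map_cons, bloopN, List.drop_succ_cons]
    have hbs : b + 1 - (s + 1) = b - s := by omega
    rw [hbs]
    exact ih _ (b + 1)

theorem B_main (qs : List String) : bloopN qs [] 0 (natBreaks qs) = chunks qs := by
  induction qs with
  | nil => simp [bloopN, natBreaks, chunks, join_empty_nil]
  | cons q qs ih =>
    by_cases hq : q = ""
    · subst hq
      rw [show natBreaks ("" :: qs) = 0 :: (natBreaks qs).map (· + 1) from by
        simp [natBreaks]]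
      rw [show bloopN ("" :: qs) [] 0 (0 :: (natBreaks qs).map (· + 1))
            = bloopN ("" :: qs) [""] (0 + 1) ((natBreaks qs).map (· + 1)) from by
        simp [bloopN, join_empty_nil]]
      rw [bloopN_shift, bloopN_single, ih]
      simp [chunks]
    · rcases hnb : natBreaks qs with _ | ⟨b, bs⟩
      · rw [show natBreaks (q :: qs) = [] from by simp [natBreaks, hnb, hq]]
        rw [hnb] at ih
        simp only [bloopN, List.nil_append, List.drop_zero] at ih ⊢
        rw [join_empty_cons]
        simp only [chunks, if_neg hq, ← ih]
      · rw [show natBreaks (q :: qs) = (b + 1) :: bs.map (· + 1) from by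
          simp [natBreaks, hnb, hq]]
        rw [show bloopN (q :: qs) [] 0 ((b + 1) :: bs.map (· + 1))
              = bloopN (q :: qs) [PySem.Str.join "" (List.take (b + 1) (q :: qs))]
                  ((b + 1) + 1) (bs.map (· + 1)) from by
          simp [bloopN]]
        rw [List.take_succ_cons, join_empty_cons, bloopN_shift, bloopN_single]
        rw [hnb] at ih
        rw [show bloopN qs [] 0 (b :: bs)
              = bloopN qs [PySem.Str.join "" (List.take b qs)] (b + 1) bs from by
            simp [bloopN],
          bloopN_single] at ih
        simp only [chunks, if_neg hq, ← ih]

theorem B_eq_chunks (qs : List String) : make_groups_alt qs = chunks qs := by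
  have h1 := enum_filter qs 0
  simp only [zero_add] at h1
  have h2 := bridge qs (natBreaks qs) [] 0
  simp only [Nat.cast_zero] at h2
  unfold make_groups_alt
  rw [h1, h2, B_main]

-- ===== VERDICT (by name: the statement is the Claim_ definition above) =====
theorem make_groups_spec : Claim_equal_make_groups := by
  intro qs _
  unfold Spec_make_groups
  rw [A_eq_chunks, B_eq_chunks]
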